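-- pv_equiv track=rewrite | github.com/moredatarequired/curse-typing | curse_typing/practice.py | mistakes
-- ===== SOURCE A (Python) =====
-- def mistakes(keystrokes):
--     """Get the number of streaks of wrong keys."""
--     streak = False
--     wrong = 0
--     for c, a, _ in keystrokes:
--         if streak:
--             if c == a:
--                 streak = False
--             continue
--         if c != a:
--             streak = True
--             wrong += 1
--
--     return wrong
-- ===== SOURCE B (Python) =====
-- def mistakes(keystrokes):
--     """Get the number of streaks of wrong keys."""
--     w = [c != a for c, a, _ in keystrokes]
--     return sum(w) - sum(x and y for x, y in zip(w, w[1:]))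
-- ===== Notes on version B (the rewrite author's own statement) =====
-- stated objective: alternative
-- what changed: Counts streaks by inclusion-exclusion: number of wrong keystrokes minus number of adjacent wrong-wrong pairs, instead of a single pass with a streak flag.
import Mathlib
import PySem

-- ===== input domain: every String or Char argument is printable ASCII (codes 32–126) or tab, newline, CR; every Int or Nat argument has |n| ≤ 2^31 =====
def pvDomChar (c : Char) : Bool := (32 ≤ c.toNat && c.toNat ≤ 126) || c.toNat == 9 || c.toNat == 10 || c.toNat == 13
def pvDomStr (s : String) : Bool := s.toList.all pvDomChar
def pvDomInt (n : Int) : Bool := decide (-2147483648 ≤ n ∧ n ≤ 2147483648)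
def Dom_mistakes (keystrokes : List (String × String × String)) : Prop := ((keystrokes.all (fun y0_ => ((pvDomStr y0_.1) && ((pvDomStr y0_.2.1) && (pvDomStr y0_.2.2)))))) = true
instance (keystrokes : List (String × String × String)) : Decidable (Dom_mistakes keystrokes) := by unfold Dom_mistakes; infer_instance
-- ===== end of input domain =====

-- B counts streaks by inclusion-exclusion (#wrong keystrokes minus #adjacent wrong-wrong
-- pairs) instead of A's single pass with a streak flag; same cost, different algorithm.
-- ===== PORT A =====
def mistakesLoop : Bool → Int → List (String × String × String) → Int
  | _, wrong, [] => wrong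
  | streak, wrong, (c, a, _) :: rest =>
    if streak then
      if c == a then mistakesLoop false wrong rest
      else mistakesLoop streak wrong rest
    else if c != a then mistakesLoop true (wrong + 1) rest
    else mistakesLoop streak wrong rest

def mistakes (keystrokes : List (String × String × String)) : Int :=
  mistakesLoop false 0 keystrokes

-- ===== PORT B =====
-- sum(w) : number of True entries
def countTrue : List Bool → Int
  | [] => 0
  | b :: t => (if b then 1 else 0) + countTrue t

-- sum(x and y for x, y in zip(w, w[1:])) : adjacent True-True pairs
def pairTrue : List Bool → Int
  | [] => 0
  | [_] => 0
  | x :: y :: t => (if x && y then 1 else 0) + pairTrue (y :: t)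

def mistakes_alt (keystrokes : List (String × String × String)) : Int :=
  let w := keystrokes.map (fun t => t.1 != t.2.1)
  countTrue w - pairTrue w

-- ===== PRECONDITION & SPEC =====
def Spec_mistakes (keystrokes : List (String × String × String)) (out : Int) : Prop := out = mistakes_alt keystrokes
instance (keystrokes : List (String × String × String)) (out : Int) : Decidable (Spec_mistakes keystrokes out) := by unfold Spec_mistakes; infer_instance

-- ===== CLAIM (what is proved, stated in full; the proofs are below) =====
def Claim_equal_mistakes : Prop := ∀ (keystrokes : List (String × String × String)), Dom_mistakes keystrokes → Spec_mistakes keystrokes (mistakes keystrokes)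

-- ===== LEMMAS AND PROOFS =====
-- pairs of adjacent Trues in prev :: l, consumed one step at a time
def pairTrueFrom : Bool → List Bool → Int
  | _, [] => 0
  | prev, b :: t => (if prev && b then 1 else 0) + pairTrueFrom b t

theorem pairTrueFrom_eq (l : List Bool) : ∀ x : Bool, pairTrueFrom x l = pairTrue (x :: l) := by
  induction l with
  | nil => intro x; simp [pairTrueFrom, pairTrue]
  | cons y t ih => intro x; simp [pairTrueFrom, pairTrue, ih]

theorem mistakesLoop_eq (rest : List (String × String × String)) :
    ∀ (s : Bool) (w : Int),
      mistakesLoop s w rest =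
        w + countTrue (rest.map (fun t => t.1 != t.2.1))
          - pairTrueFrom s (rest.map (fun t => t.1 != t.2.1)) := by
  induction rest with
  | nil => intro s w; simp [mistakesLoop, countTrue, pairTrueFrom]
  | cons h t ih =>
    intro s w
    obtain ⟨c, a, x⟩ := h
    by_cases hc : c = a
    · cases s <;> simp [mistakesLoop, countTrue, pairTrueFrom, bne, hc, ih]
    · have hb : (c == a) = false := beq_eq_false_iff_ne.mpr hc
      cases s <;> simp [mistakesLoop, countTrue, pairTrueFrom, bne, hb, ih] <;> omega

-- ===== VERDICT (by name: the statement is the Claim_ definition above) =====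
theorem mistakes_spec : Claim_equal_mistakes := by
  intro ks _
  unfold Spec_mistakes mistakes mistakes_alt
  rw [mistakesLoop_eq]
  cases hm : ks.map (fun t => t.1 != t.2.1) with
  | nil => simp [pairTrueFrom, pairTrue]
  | cons b l => simp [pairTrueFrom, pairTrueFrom_eq]
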